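-- pv_equiv track=rewrite | github.com/foschw/MSc_prototype | merge_imports.py | avoid_rename_collision
-- ===== SOURCE A (Python) =====
-- def avoid_rename_collision(sc_path, sc_var_name, glob_name_rename, cnt):
-- 	prefix = "s" + str(cnt) + "_"
-- 	name_clean = False
-- 	while not name_clean:
-- 		name_clean = True
-- 		for ren_dict_name in glob_name_rename.keys():
-- 			if ren_dict_name == sc_path:
-- 				continue
-- 			else:
-- 				for var_name in list(glob_name_rename[ren_dict_name].values()) + list(glob_name_rename[ren_dict_name].values()):
-- 					if prefix + sc_var_name == var_name:
-- 						name_clean = False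
-- 						prefix = prefix[0] + "0" + prefix[1:]
-- 						break
--
-- 	return prefix + sc_var_name
-- ===== SOURCE B (Python) =====
-- def avoid_rename_collision(sc_path, sc_var_name, glob_name_rename, cnt):
--     suffix = str(cnt) + "_" + sc_var_name
--     taken = set()
--     for path, renames in glob_name_rename.items():
--         if path == sc_path:
--             continue
--         for v in renames.values():
--             if len(v) >= 1 + len(suffix) and v[0] == 's' and v.endswith(suffix):
--                 mid = v[1:len(v) - len(suffix)]
--                 if all(c == '0' for c in mid):
--                     taken.add(len(mid))
--     k = 0
--     while k in taken:
--         k += 1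
--     return "s" + "0" * k + suffix
-- ===== Notes on version B (the rewrite author's own statement) =====
-- stated objective: faster
-- what changed: A repeatedly rescans every other dict's values for each probed prefix (restarting the whole scan after each collision); B makes a single pass that parses each value into the zero-count slot it occupies ('s' + '0'*m + str(cnt) + '_' + name) and then returns the first free slot.
import Mathlib
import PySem

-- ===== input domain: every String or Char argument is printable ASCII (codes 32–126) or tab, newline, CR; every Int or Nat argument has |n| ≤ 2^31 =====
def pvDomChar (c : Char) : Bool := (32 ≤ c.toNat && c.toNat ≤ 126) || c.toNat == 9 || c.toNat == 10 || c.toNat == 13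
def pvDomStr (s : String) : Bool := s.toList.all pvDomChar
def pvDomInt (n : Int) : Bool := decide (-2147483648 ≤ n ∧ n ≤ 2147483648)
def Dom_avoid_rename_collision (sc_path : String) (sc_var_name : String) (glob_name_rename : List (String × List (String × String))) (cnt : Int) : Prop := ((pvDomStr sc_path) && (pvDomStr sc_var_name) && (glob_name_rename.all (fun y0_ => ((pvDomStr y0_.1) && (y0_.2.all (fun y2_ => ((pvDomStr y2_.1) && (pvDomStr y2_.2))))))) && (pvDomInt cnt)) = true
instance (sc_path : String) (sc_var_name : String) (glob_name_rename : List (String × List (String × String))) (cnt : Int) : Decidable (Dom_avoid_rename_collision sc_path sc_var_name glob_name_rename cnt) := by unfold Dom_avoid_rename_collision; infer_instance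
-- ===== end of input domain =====

-- B replaces A's repeated probe-and-rescan of every rename dict by one pass that parses each
-- value into its occupied zero-count and then takes the first free count (objective: faster).

-- ===== PORT A =====

-- prefix[0] + "0" + prefix[1:]; in A the prefix always starts with 's', so [] is unreachable
def arcInsert0 (p : String) : String :=
  match p.toList with
  | [] => ""
  | c :: rest => String.ofList (c :: '0' :: rest)

-- the inner 'for var_name in …: if prefix + sc_var_name == var_name: …; break'
def arcScan (sc_var_name : String) (st : Bool × String) : List String → Bool × String
  | [] => st
  | v :: rest =>
    if st.2 ++ sc_var_name == v then (false, arcInsert0 st.2)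
    else arcScan sc_var_name st rest

-- one full 'for ren_dict_name in glob_name_rename.keys(): …' pass over the outer dict
def arcPass (sc_path sc_var_name : String) (g : List (String × List (String × String)))
    (st : Bool × String) : Bool × String :=
  (PySem.Dict.mk g).keys.foldl (fun st key =>
    if key == sc_path then st
    else
      match (PySem.Dict.mk g).get? key with
      | none => st   -- unreachable: key is drawn from the same dict's keys
      | some d => arcScan sc_var_name st ((PySem.Dict.mk d).values ++ (PySem.Dict.mk d).values)) st

-- the 'while not name_clean' loop; the fuel only makes the loop structural (proved sufficient below)
def arcLoop (sc_path sc_var_name : String) (g : List (String × List (String × String))) :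
    Nat → String → String
  | 0, p => p ++ sc_var_name
  | fuel + 1, p =>
    let st := arcPass sc_path sc_var_name g (true, p)
    if st.1 then st.2 ++ sc_var_name else arcLoop sc_path sc_var_name g fuel st.2

def avoid_rename_collision (sc_path : String) (sc_var_name : String) (glob_name_rename : List (String × List (String × String))) (cnt : Int) : String :=
  arcLoop sc_path sc_var_name glob_name_rename
    (glob_name_rename.foldl (fun a kv => a + kv.2.length) 0 + 1)
    ("s" ++ PySem.Int.toStr cnt ++ "_")

-- ===== PORT B =====

-- 'len(v) >= 1+len(suffix) and v[0] == "s" and v.endswith(suffix) and mid all zeros' → zero-count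
def arcParse (suffix v : List Char) : Option Nat :=
  if 1 + suffix.length ≤ v.length
      ∧ PySem.List.pyGet? v 0 = some 's'
      ∧ PySem.Chars.endswith v suffix = true
      ∧ (PySem.List.slice v (some ((1 : Nat) : Int)) (some ((v.length - suffix.length : Nat) : Int))).all (fun c => c == '0') = true
  then some (PySem.List.slice v (some ((1 : Nat) : Int)) (some ((v.length - suffix.length : Nat) : Int))).length
  else none

-- the set 'taken' of occupied zero-counts, one pass over all other dicts' values
def arcTaken (sc_path : String) (suffix : List Char)
    (g : List (String × List (String × String))) : PySem.Set Nat :=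
  g.foldl (fun acc kv =>
    if kv.1 == sc_path then acc
    else kv.2.foldl (fun acc pr =>
      match arcParse suffix pr.2.toList with
      | some n => PySem.Set.add acc n
      | none => acc) acc) PySem.Set.empty

-- 'k = 0; while k in taken: k += 1' (fuel makes it structural; |taken|+1 steps always suffice)
def arcLeast (taken : PySem.Set Nat) : Nat → Nat → Nat
  | 0, k => k
  | fuel + 1, k => if taken.contains k then arcLeast taken fuel (k + 1) else k

def avoid_rename_collision_alt (sc_path : String) (sc_var_name : String) (glob_name_rename : List (String × List (String × String))) (cnt : Int) : String :=
  let suffix := (PySem.Int.toStr cnt).toList ++ '_' :: sc_var_name.toList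
  let taken := arcTaken sc_path suffix glob_name_rename
  let k := arcLeast taken (taken.length + 1) 0
  String.ofList ('s' :: (List.replicate k '0' ++ suffix))

-- ===== PRECONDITION & SPEC =====
-- In Python glob_name_rename is a dict, so its keys are distinct; Pre_ excludes only the
-- duplicate-key association lists that representation cannot produce (A reads entries through
-- first-match key lookup, B reads the entries directly, so they could disagree there).
def Pre_avoid_rename_collision (sc_path : String) (sc_var_name : String) (glob_name_rename : List (String × List (String × String))) (cnt : Int) : Prop :=
  (glob_name_rename.map Prod.fst).Nodup
instance (sc_path : String) (sc_var_name : String) (glob_name_rename : List (String × List (String × String))) (cnt : Int) : Decidable (Pre_avoid_rename_collision sc_path sc_var_name glob_name_rename cnt) := by unfold Pre_avoid_rename_collision; infer_instance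

def pvWitness_avoid_rename_collision : String × String × (List (String × List (String × String))) × Int :=
  ("f.py", "x", [("g.py", [("x", "s1_x")]), ("h.py", [("y", "s01_x")])], 1)

def Spec_avoid_rename_collision (sc_path : String) (sc_var_name : String) (glob_name_rename : List (String × List (String × String))) (cnt : Int) (out : String) : Prop := out = avoid_rename_collision_alt sc_path sc_var_name glob_name_rename cnt
instance (sc_path : String) (sc_var_name : String) (glob_name_rename : List (String × List (String × String))) (cnt : Int) (out : String) : Decidable (Spec_avoid_rename_collision sc_path sc_var_name glob_name_rename cnt out) := by unfold Spec_avoid_rename_collision; infer_instance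

-- ===== CLAIM (what is proved, stated in full; the proofs are below) =====
def Claim_equal_avoid_rename_collision : Prop := ∀ (sc_path : String) (sc_var_name : String) (glob_name_rename : List (String × List (String × String))) (cnt : Int), Dom_avoid_rename_collision sc_path sc_var_name glob_name_rename cnt → Pre_avoid_rename_collision sc_path sc_var_name glob_name_rename cnt → Spec_avoid_rename_collision sc_path sc_var_name glob_name_rename cnt (avoid_rename_collision sc_path sc_var_name glob_name_rename cnt)

-- ===== LEMMAS AND PROOFS =====

-- the candidate name with n extra zeros, as a character list ('s' + '0'*n + suffix)
def candL (suffix : List Char) (n : Nat) : List Char := 's' :: (List.replicate n '0' ++ suffix)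

def cand (suffix : List Char) (n : Nat) : String := String.ofList (candL suffix n)

-- the prefix A carries after n collisions, for tl = str(cnt) + "_"
def strpfx (tl : List Char) (n : Nat) : String := String.ofList ('s' :: (List.replicate n '0' ++ tl))

-- all values A compares against (entries with key ≠ sc_path, read positionally)
def arcVals (sc_path : String) (g : List (String × List (String × String))) : List String :=
  (g.filter (fun kv => !(kv.1 == sc_path))).flatMap (fun kv => kv.2.map Prod.snd)

-- A's pass re-expressed over the entry list (equal to arcPass when the keys are distinct)
def arcPassE (sc_path sc_var_name : String) (L : List (String × List (String × String)))
    (st : Bool × String) : Bool × String :=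
  L.foldl (fun st kv =>
    if kv.1 == sc_path then st
    else arcScan sc_var_name st (kv.2.map Prod.snd ++ kv.2.map Prod.snd)) st

-- the zero-count A's pass leaves, computed on counts alone
def arcPassK (sc_path : String) (suffix : List Char) :
    List (String × List (String × String)) → Nat → Nat
  | [], k => k
  | kv :: L, k =>
    if kv.1 == sc_path then arcPassK sc_path suffix L k
    else if cand suffix k ∈ kv.2.map Prod.snd then arcPassK sc_path suffix L (k + 1)
    else arcPassK sc_path suffix L k

theorem candL_length (suffix : List Char) (n : Nat) :
    (candL suffix n).length = n + suffix.length + 1 := by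
  simp [candL]

theorem cand_inj (suffix : List Char) {m n : Nat} (h : cand suffix m = cand suffix n) : m = n := by
  have := congrArg (fun s : String => s.toList.length) h
  simpa [cand, candL_length] using this

theorem strpfx_append (tl : List Char) (name : String) (k : Nat) :
    strpfx tl k ++ name = cand (tl ++ name.toList) k := by
  apply String.toList_inj.mp
  simp [strpfx, cand, candL]

theorem insert0_strpfx (tl : List Char) (k : Nat) :
    arcInsert0 (strpfx tl k) = strpfx tl (k + 1) := by
  simp [arcInsert0, strpfx, List.replicate_succ]

theorem scan_spec (name : String) (st : Bool × String) (vals : List String) :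
    arcScan name st vals = if st.2 ++ name ∈ vals then (false, arcInsert0 st.2) else st := by
  induction vals with
  | nil => simp [arcScan]
  | cons v rest ih =>
    by_cases h : st.2 ++ name = v
    · simp [arcScan, h]
    · have hb : (st.2 ++ name == v) = false := by simp [h]
      simp [arcScan, hb, h, ih]

theorem get?_mk_of_nodup (g : List (String × List (String × String)))
    (hnd : (g.map Prod.fst).Nodup) (kv : String × List (String × String)) (hm : kv ∈ g) :
    (PySem.Dict.mk g).get? kv.1 = some kv.2 := by
  induction g with
  | nil => cases hm
  | cons hd tl ih =>
    rw [List.map_cons] at hnd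
    rcases List.nodup_cons.mp hnd with ⟨hni, hndtl⟩
    rcases List.mem_cons.mp hm with hm | hm
    · obtain ⟨hk, hv⟩ := hd
      subst hm
      simp [PySem.Dict.get?_mk_cons]
    · have hne : (hd.1 == kv.1) = false := by
        simp only [beq_eq_false_iff_ne]
        intro he
        exact hni (he ▸ List.mem_map.mpr ⟨kv, hm, rfl⟩)
    
      rw [PySem.Dict.get?_mk_cons]
      simp [hne, ih hndtl hm]

theorem pass_eq_passE (sc name : String) (g : List (String × List (String × String)))
    (hnd : (g.map Prod.fst).Nodup) (st : Bool × String) :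
    arcPass sc name g st = arcPassE sc name g st := by
  unfold arcPass arcPassE
  rw [PySem.Dict.keys_mk, List.foldl_map]
  apply PySem.List.foldl_congr_mem
  intro acc kv hkv
  by_cases h : kv.1 == sc
  · simp [h]
  · simp only [h, if_neg, Bool.not_eq_true]
    rw [get?_mk_of_nodup g hnd kv hkv]
    simp [PySem.Dict.values_mk]

theorem passK_le (sc : String) (suffix : List Char)
    (L : List (String × List (String × String))) (k : Nat) :
    k ≤ arcPassK sc suffix L k := by
  induction L generalizing k with
  | nil => simp [arcPassK]
  | cons kv L ih =>
    simp only [arcPassK]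
    split_ifs with h1 h2
    · exact ih k
    · exact le_trans (Nat.le_succ k) (ih (k + 1))
    · exact ih k

theorem passE_spec (sc name : String) (tl : List Char)
    (L : List (String × List (String × String))) (b : Bool) (k : Nat) :
    arcPassE sc name L (b, strpfx tl k) =
      ((b && decide (arcPassK sc (tl ++ name.toList) L k = k)),
        strpfx tl (arcPassK sc (tl ++ name.toList) L k)) := by
  induction L generalizing b k with
  | nil => simp [arcPassE, arcPassK]
  | cons kv L ih =>
    simp only [arcPassE, List.foldl_cons, arcPassK]
    by_cases h1 : kv.1 == sc
    · simpa [h1, arcPassE] using ih b k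
    · simp only [h1, if_neg, Bool.not_eq_true]
      rw [scan_spec]
      by_cases h2 : cand (tl ++ name.toList) k ∈ kv.2.map Prod.snd
      · have hmem : strpfx tl k ++ name ∈ kv.2.map Prod.snd ++ kv.2.map Prod.snd := by
          rw [strpfx_append]; simp [h2]
        rw [if_pos hmem, insert0_strpfx]
        have := ih false (k + 1)
        simp only [arcPassE] at this
        rw [this]
        have hlt : k < arcPassK sc (tl ++ name.toList) L (k + 1) :=
          lt_of_lt_of_le (Nat.lt_succ_self k) (passK_le sc _ L (k + 1))
        simp [h2, Nat.ne_of_gt hlt]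
      · have hmem : strpfx tl k ++ name ∉ kv.2.map Prod.snd ++ kv.2.map Prod.snd := by
          rw [strpfx_append]; simp [h2]
        rw [if_neg hmem]
        have := ih b k
        simp only [arcPassE] at this
        rw [this]
        simp [h2]

theorem mem_arcVals (sc : String) (g : List (String × List (String × String))) (v : String) :
    v ∈ arcVals sc g ↔ ∃ kv ∈ g, kv.1 ≠ sc ∧ v ∈ kv.2.map Prod.snd := by
  simp only [arcVals, List.mem_flatMap, List.mem_filter, Bool.not_eq_true', beq_eq_false_iff_ne,
    ne_eq, List.mem_map]
  constructor
  · rintro ⟨kv, ⟨hm, hne⟩, hv⟩; exact ⟨kv, hm, hne, hv⟩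
  · rintro ⟨kv, hm, hne, hv⟩; exact ⟨kv, ⟨hm, hne⟩, hv⟩

theorem passK_not_mem_of_eq (sc : String) (suffix : List Char)
    (L : List (String × List (String × String))) (k : Nat)
    (h : arcPassK sc suffix L k = k) : cand suffix k ∉ arcVals sc L := by
  induction L with
  | nil => simp [arcVals]
  | cons kv L ih =>
    simp only [arcPassK] at h
    intro hm
    rcases (mem_arcVals sc (kv :: L) _).mp hm with ⟨kv', h1, h2, h3⟩
    rcases List.mem_cons.mp h1 with h1 | h1
    · subst h1
      rw [if_neg (by simp [beq_iff_eq, h2]), if_pos h3] at h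
      have := passK_le sc suffix L (k + 1)
      omega
    · have hLmem : cand suffix k ∈ arcVals sc L :=
        (mem_arcVals sc L _).mpr ⟨kv', h1, h2, h3⟩
      split_ifs at h with ha hb
      · exact ih h hLmem
      · have := passK_le sc suffix L (k + 1); omega
      · exact ih h hLmem

theorem passK_taken (sc : String) (suffix : List Char)
    (L : List (String × List (String × String))) (k j : Nat)
    (h1 : k ≤ j) (h2 : j < arcPassK sc suffix L k) : cand suffix j ∈ arcVals sc L := by
  induction L generalizing k with
  | nil => simp [arcPassK] at h2; omega
  | cons kv L ih =>
    simp only [arcPassK] at h2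
    have step : ∀ kv' ∈ L, kv'.1 ≠ sc → cand suffix j ∈ kv'.2.map Prod.snd →
        cand suffix j ∈ arcVals sc (kv :: L) := fun kv' a b c =>
      (mem_arcVals _ _ _).mpr ⟨kv', List.mem_cons_of_mem _ a, b, c⟩
    have lift : cand suffix j ∈ arcVals sc L → cand suffix j ∈ arcVals sc (kv :: L) := by
      intro hm
      rcases (mem_arcVals sc L _).mp hm with ⟨kv', a, b, c⟩
      exact step kv' a b c
    split_ifs at h2 with ha hb
    · exact lift (ih k h1 h2)
    · rcases Nat.eq_or_lt_of_le h1 with he | hlt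
      · subst he
        exact (mem_arcVals _ _ _).mpr ⟨kv, List.mem_cons_self,
          by simpa [beq_iff_eq] using ha, hb⟩
      · exact lift (ih (k + 1) hlt h2)
    · exact lift (ih k h1 h2)

theorem loop_spec (sc name : String) (tl : List Char)
    (g : List (String × List (String × String))) (hnd : (g.map Prod.fst).Nodup)
    (fuel k K : Nat) (hkK : k ≤ K) (hfuel : K - k < fuel)
    (htaken : ∀ j, k ≤ j → j < K → cand (tl ++ name.toList) j ∈ arcVals sc g)
    (hfree : cand (tl ++ name.toList) K ∉ arcVals sc g) :
    arcLoop sc name g fuel (strpfx tl k) = cand (tl ++ name.toList) K := by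
  induction fuel generalizing k with
  | zero => omega
  | succ fuel ih =>
    simp only [arcLoop]
    rw [pass_eq_passE sc name g hnd, passE_spec]
    set k' := arcPassK sc (tl ++ name.toList) g k with hk'
    by_cases heq : k' = k
    · have hkeqK : k = K := by
        rcases Nat.eq_or_lt_of_le hkK with he | hlt
        · exact he
        · exact absurd (htaken k le_rfl hlt) (passK_not_mem_of_eq sc _ g k heq)
      rw [heq]
      rw [if_pos (by simp)]
      rw [strpfx_append, hkeqK]
    · have hlt : k < k' := lt_of_le_of_ne (passK_le sc _ g k) (Ne.symm heq)
      have hk'K : k' ≤ K := by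
        by_contra hcon
        exact hfree (passK_taken sc _ g k K hkK (by omega))
      rw [if_neg (by simp [heq])]
      exact ih k' hk'K (by omega)
        (fun j hj1 hj2 => htaken j (by omega) hj2)

theorem parse_spec (suffix v : List Char) (n : Nat) :
    arcParse suffix v = some n ↔ v = candL suffix n := by
  constructor
  · intro h
    unfold arcParse at h
    split_ifs at h with hc
    · obtain ⟨hlen, hget, hend, hall⟩ := hc
      rcases v with _ | ⟨c, rest⟩
      · simp at hlen
      · have hc0 : c = 's' := by
          simpa [PySem.List.pyGet?, PySem.List.pyIdx?] using hget
        have hlen' : 1 + suffix.length ≤ rest.length + 1 := by simpa using hlen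
        have hslice : PySem.List.slice (c :: rest) (some ((1 : Nat) : Int))
            (some (((c :: rest).length - suffix.length : Nat) : Int)) =
            rest.take ((c :: rest).length - suffix.length - 1) := by
          rw [PySem.List.slice_natCast]
          simp
        rw [hslice] at h hall
        have hmidlen : (rest.take ((c :: rest).length - suffix.length - 1)).length =
            rest.length - suffix.length := by
          simp only [List.length_take, List.length_cons] at *
          omega
        have hn : n = rest.length - suffix.length := by
          rw [hmidlen] at h; exact (Option.some_inj.mp h).symm
        have hmid : rest.take ((c :: rest).length - suffix.length - 1) =
            List.replicate (rest.length - suffix.length) '0' := by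
          refine List.eq_replicate_iff.mpr ⟨by rw [hmidlen], ?_⟩
          intro b hb
          have := List.all_eq_true.mp hall b hb
          simpa [beq_iff_eq] using this
        have hsuf : rest.drop (rest.length - suffix.length) = suffix := by
          have hsx : suffix <:+ (c :: rest) := (PySem.Chars.endswith_iff _ _).mp hend
          have : suffix <:+ rest := by
            rcases hsx with ⟨t, ht⟩
            rcases t with _ | ⟨t0, t⟩
            · exfalso
              have := congrArg List.length ht
              simp at this
              omega
            · exact ⟨t, by simpa using congrArg List.tail ht⟩
          exact (List.suffix_iff_eq_drop.mp this).symm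
        have hcnt : (c :: rest).length - suffix.length - 1 = rest.length - suffix.length := by
          simp only [List.length_cons]; omega
        rw [hcnt] at hmid
        subst hc0 hn
        have : rest = List.replicate (rest.length - suffix.length) '0' ++ suffix := by
          conv_lhs => rw [← List.take_append_drop (rest.length - suffix.length) rest]
          rw [hsuf, hmid]
        conv_lhs => rw [this]
        simp [candL]
  · intro h
    subst h
    unfold arcParse
    have hl : (candL suffix n).length = n + suffix.length + 1 := candL_length suffix n
    rw [if_pos]
    · congr 1
      rw [PySem.List.slice_natCast]
      simp [candL]
      omega
    · refine ⟨by omega, ?_, ?_, ?_⟩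
      · have h0 : (0 : Int) ≤ (n : Int) + (suffix.length : Int) := by positivity
        simp only [candL]
        simp [PySem.List.pyGet?, PySem.List.pyIdx?, h0]
      · rw [PySem.Chars.endswith_iff]
        exact ⟨'s' :: List.replicate n '0', by simp [candL]⟩
      · rw [PySem.List.slice_natCast]
        rw [List.all_eq_true]
        intro b hb
        have : b ∈ List.replicate n '0' := by
          have h1 : List.drop 1 (candL suffix n) = List.replicate n '0' ++ suffix := by
            simp [candL]
          rw [hl] at hb
          simp only [h1] at hb
          have h2 : n + suffix.length + 1 - suffix.length - 1 = n := by omega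
          rw [h2, List.take_append_of_le_length (by simp)] at hb
          simpa using hb
        simp [List.eq_of_mem_replicate this]
      
theorem parse_eq_iff (suffix : List Char) (v : String) (n : Nat) :
    arcParse suffix v.toList = some n ↔ v = cand suffix n := by
  rw [parse_spec, cand]
  exact ⟨fun h => String.toList_inj.mp (by rw [h, String.toList_ofList]),
    fun h => by rw [h, String.toList_ofList]⟩

theorem mem_taken_inner (suffix : List Char) (prs : List (String × String))
    (acc : PySem.Set Nat) (n : Nat) :
    n ∈ prs.foldl (fun acc pr =>
        match arcParse suffix pr.2.toList with
        | some m => PySem.Set.add acc m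
        | none => acc) acc ↔
      n ∈ acc ∨ ∃ pr ∈ prs, arcParse suffix pr.2.toList = some n := by
  induction prs generalizing acc with
  | nil => simp
  | cons pr prs ih =>
    simp only [List.foldl_cons]
    cases hp : arcParse suffix pr.2.toList with
    | none =>
      rw [ih]
      simp only [List.mem_cons]
      constructor
      · rintro (h | ⟨q, hq, he⟩)
        · exact Or.inl h
        · exact Or.inr ⟨q, Or.inr hq, he⟩
      · rintro (h | ⟨q, hq | hq, he⟩)
        · exact Or.inl h
        · rw [hq, hp] at he; cases he
        · exact Or.inr ⟨q, hq, he⟩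
    | some m =>
      rw [ih]
      simp only [PySem.Set.mem_add, List.mem_cons]
      constructor
      · rintro ((h | h) | ⟨q, hq, he⟩)
        · exact Or.inl h
        · exact Or.inr ⟨pr, Or.inl rfl, by rw [hp, h]⟩
        · exact Or.inr ⟨q, Or.inr hq, he⟩
      · rintro (h | ⟨q, hq | hq, he⟩)
        · exact Or.inl (Or.inl h)
        · rw [hq, hp] at he
          exact Or.inl (Or.inr (Option.some_inj.mp he).symm)
        · exact Or.inr ⟨q, hq, he⟩

theorem mem_taken_fold (sc : String) (suffix : List Char)
    (g : List (String × List (String × String))) (acc : PySem.Set Nat) (n : Nat) :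
    n ∈ g.foldl (fun acc kv =>
        if kv.1 == sc then acc
        else kv.2.foldl (fun acc pr =>
          match arcParse suffix pr.2.toList with
          | some m => PySem.Set.add acc m
          | none => acc) acc) acc ↔
      n ∈ acc ∨ ∃ kv ∈ g, kv.1 ≠ sc ∧ ∃ pr ∈ kv.2, arcParse suffix pr.2.toList = some n := by
  induction g generalizing acc with
  | nil => simp
  | cons kv g ih =>
    simp only [List.foldl_cons]
    by_cases hk : kv.1 = sc
    · rw [if_pos (by simp [hk]), ih]
      simp only [List.mem_cons]
      constructor
      · rintro (h | ⟨q, hq, he⟩)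
        · exact Or.inl h
        · exact Or.inr ⟨q, Or.inr hq, he⟩
      · rintro (h | ⟨q, hq | hq, hne, he⟩)
        · exact Or.inl h
        · exact absurd (hq ▸ hk) hne
        · exact Or.inr ⟨q, hq, hne, he⟩
    · rw [if_neg (by simp [hk]), ih, mem_taken_inner]
      simp only [List.mem_cons]
      constructor
      · rintro ((h | ⟨q, hq, he⟩) | ⟨q, hq, hne, he⟩)
        · exact Or.inl h
        · exact Or.inr ⟨kv, Or.inl rfl, hk, q, hq, he⟩
        · exact Or.inr ⟨q, Or.inr hq, hne, he⟩
      · rintro (h | ⟨q, hq | hq, hne, he⟩)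
        · exact Or.inl (Or.inl h)
        · exact Or.inl (Or.inr (hq ▸ he))
        · exact Or.inr ⟨q, hq, hne, he⟩

theorem taken_mem (sc : String) (suffix : List Char)
    (g : List (String × List (String × String))) (n : Nat) :
    n ∈ arcTaken sc suffix g ↔ cand suffix n ∈ arcVals sc g := by
  rw [arcTaken, mem_taken_fold, mem_arcVals]
  simp only [PySem.Set.empty]
  constructor
  · rintro (h | ⟨kv, hkv, hne, pr, hpr, hpe⟩)
    · cases h
    · exact ⟨kv, hkv, hne, List.mem_map.mpr ⟨pr, hpr, (parse_eq_iff suffix pr.2 n).mp hpe⟩⟩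
  · rintro ⟨kv, hkv, hne, hv⟩
    rcases List.mem_map.mp hv with ⟨pr, hpr, hpe⟩
    exact Or.inr ⟨kv, hkv, hne, pr, hpr, (parse_eq_iff suffix pr.2 n).mpr hpe⟩

theorem least_spec (taken : PySem.Set Nat) (fuel k K : Nat) (hkK : k ≤ K)
    (hfuel : K - k < fuel) (htaken : ∀ j, k ≤ j → j < K → j ∈ taken) (hfree : K ∉ taken) :
    arcLeast taken fuel k = K := by
  induction fuel generalizing k with
  | zero => omega
  | succ fuel ih =>
    simp only [arcLeast]
    by_cases hk : k = K
    · subst hk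
      rw [if_neg (by simpa [PySem.Set.contains] using hfree)]
    · have hklt : k < K := lt_of_le_of_ne hkK hk
      rw [if_pos (by simpa [PySem.Set.contains] using htaken k le_rfl hklt)]
      exact ih (k + 1) hklt (by omega) (fun j h1 h2 => htaken j (by omega) h2)

-- the first free count exists: any candidate longer than every stored value is unused
theorem exists_free (sc : String) (suffix : List Char)
    (g : List (String × List (String × String))) :
    ∃ n, cand suffix n ∉ arcVals sc g := by
  refine ⟨((arcVals sc g).map (fun v => v.toList.length)).sum + 1, fun hm => ?_⟩
  have hle : (cand suffix _).toList.length ≤ ((arcVals sc g).map (fun v => v.toList.length)).sum :=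
    List.single_le_sum (by simp) _ (List.mem_map.mpr ⟨_, hm, rfl⟩)
  rw [cand, String.toList_ofList, candL_length] at hle
  omega

-- if every count below K is occupied then K is at most the number of stored values
theorem pigeonhole {α : Type} (K : Nat) (f : Nat → α) (l : List α)
    (hinj : ∀ m n, f m = f n → m = n) (h : ∀ j < K, f j ∈ l) : K ≤ l.length := by
  have hnd : ((List.range K).map f).Nodup :=
    List.Nodup.map (fun a b hab => hinj a b hab) (List.nodup_range)
  have hsub : ((List.range K).map f) ⊆ l := by
    intro x hx
    rcases List.mem_map.mp hx with ⟨j, hj, rfl⟩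
    exact h j (List.mem_range.mp hj)
  have := (List.subperm_of_subset hnd hsub).length_le
  simpa using this

theorem foldl_len_eq (g : List (String × List (String × String))) (a : Nat) :
    g.foldl (fun a kv => a + kv.2.length) a = a + (g.map (fun kv => kv.2.length)).sum := by
  induction g generalizing a with
  | nil => simp
  | cons kv g ih => simp [List.foldl_cons, ih]; omega

theorem vals_length_le (sc : String) (g : List (String × List (String × String))) :
    (arcVals sc g).length ≤ g.foldl (fun a kv => a + kv.2.length) 0 := by
  rw [foldl_len_eq, arcVals, List.length_flatMap]
  have hsub : ((g.filter (fun kv => !(kv.1 == sc))).map (fun kv => (kv.2.map Prod.snd).length)).Sublist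
      (g.map (fun kv => (kv.2.map Prod.snd).length)) :=
    List.Sublist.map _ List.filter_sublist
  calc ((g.filter (fun kv => !(kv.1 == sc))).map (fun a => (a.2.map Prod.snd).length)).sum
      ≤ (g.map (fun kv => (kv.2.map Prod.snd).length)).sum := hsub.sum_le_sum (by simp)
    _ = 0 + (g.map (fun kv => kv.2.length)).sum := by simp

-- ===== VERDICT (by name: the statement is the Claim_ definition above) =====
theorem avoid_rename_collision_spec : Claim_equal_avoid_rename_collision := by
  intro sc name g cnt _ hnd
  unfold Spec_avoid_rename_collision
  unfold Pre_avoid_rename_collision at hnd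
  set tl : List Char := (PySem.Int.toStr cnt).toList ++ ['_'] with htl
  set suffix : List Char := tl ++ name.toList with hsfx
  have hsfx' : (PySem.Int.toStr cnt).toList ++ '_' :: name.toList = suffix := by
    rw [hsfx, htl]; simp
  obtain ⟨K, hKfree, hKmin⟩ :
      ∃ K, cand suffix K ∉ arcVals sc g ∧ ∀ j < K, cand suffix j ∈ arcVals sc g := by
    classical
    have hex := exists_free sc suffix g
    refine ⟨Nat.find hex, Nat.find_spec hex, fun j hj => ?_⟩
    have := Nat.find_min hex hj
    exact not_not.mp this
  have hKle : K ≤ (arcVals sc g).length :=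
    pigeonhole K (cand suffix) (arcVals sc g) (fun m n h => cand_inj suffix h)
      (fun j hj => hKmin j hj)
  -- A's side
  have hstart : ("s" ++ PySem.Int.toStr cnt ++ "_" : String) = strpfx tl 0 := by
    apply String.toList_inj.mp
    simp [strpfx, htl]
  have hA : avoid_rename_collision sc name g cnt = cand suffix K := by
    rw [avoid_rename_collision, hstart]
    exact loop_spec sc name tl g hnd _ 0 K (Nat.zero_le K)
      (by have := vals_length_le sc g; omega)
      (fun j _ hj => hKmin j hj) hKfree
  -- B's side
  have hB : avoid_rename_collision_alt sc name g cnt = cand suffix K := by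
    rw [avoid_rename_collision_alt]
    simp only [hsfx']
    have hKle' : K ≤ (arcTaken sc suffix g).length :=
      pigeonhole K (fun j => j) (arcTaken sc suffix g) (fun m n h => h)
        (fun j hj => (taken_mem sc suffix g j).mpr (hKmin j hj))
    rw [least_spec (arcTaken sc suffix g) _ 0 K (Nat.zero_le K) (by omega)
      (fun j _ hj => (taken_mem sc suffix g j).mpr (hKmin j hj))
      (fun hm => hKfree ((taken_mem sc suffix g K).mp hm))]
    rfl
  rw [hA, hB]
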